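-- pv_equiv track=rewrite | github.com/ChibiKev/Leetcode | 2656. Maximum Sum With Exactly K Elements/solution.py | maximizeSum
-- ===== SOURCE A (Python) =====
-- def maximizeSum(nums, k):
--   """
--   :type nums: List[int]
--   :type k: int
--   :rtype: int
--   """
--   maximum = 0
--   for num in nums:
--     if maximum < num:
--       maximum = num
--
--   total = 0
--   for index in range(k):
--     total += maximum + index
--   return total
-- ===== SOURCE B (Python) =====
-- def maximizeSum(nums, k):
--     if k <= 0:
--         return 0
--     m = max([0] + nums)
--     return k * m + k * (k - 1) // 2
-- ===== Notes on version B (the rewrite author's own statement) =====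
-- stated objective: simpler
-- what changed: Replaced the O(k) accumulation loop over range(k) with the closed-form k*m + k*(k-1)//2, and the hand-written running-max loop with the max built-in.
import Mathlib
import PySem

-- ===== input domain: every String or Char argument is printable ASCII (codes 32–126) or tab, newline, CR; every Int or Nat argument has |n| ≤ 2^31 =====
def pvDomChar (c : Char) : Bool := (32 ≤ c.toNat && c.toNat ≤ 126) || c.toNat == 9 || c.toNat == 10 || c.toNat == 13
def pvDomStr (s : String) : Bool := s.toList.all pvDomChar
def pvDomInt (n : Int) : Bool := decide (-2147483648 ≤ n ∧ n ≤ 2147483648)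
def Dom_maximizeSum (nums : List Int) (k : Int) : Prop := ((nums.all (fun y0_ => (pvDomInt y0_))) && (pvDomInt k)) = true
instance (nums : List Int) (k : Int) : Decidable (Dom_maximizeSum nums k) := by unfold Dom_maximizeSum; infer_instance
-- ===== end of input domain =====

-- B: closed-form k*m + k*(k-1)//2 with the built-in max instead of the two hand-written loops.

-- ===== PORT A =====
def maximizeSum (nums : List Int) (k : Int) : Int :=
  let maximum := nums.foldl (fun maximum num => if maximum < num then num else maximum) 0
  let total := (PySem.List.pyRange 0 k 1).foldl (fun total index => total + (maximum + index)) 0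
  total

-- ===== PORT B =====
def maximizeSum_alt (nums : List Int) (k : Int) : Int :=
  if k ≤ 0 then 0
  else
    let m := (PySem.List.max? ((0 : Int) :: nums) (fun y => y)).getD 0
    k * m + PySem.Int.floordiv (k * (k - 1)) 2

-- ===== PRECONDITION & SPEC =====
def Spec_maximizeSum (nums : List Int) (k : Int) (out : Int) : Prop := out = maximizeSum_alt nums k
instance (nums : List Int) (k : Int) (out : Int) : Decidable (Spec_maximizeSum nums k out) := by unfold Spec_maximizeSum; infer_instance

-- ===== CLAIM (what is proved, stated in full; the proofs are below) =====
def Claim_equal_maximizeSum : Prop := ∀ (nums : List Int) (k : Int), Dom_maximizeSum nums k → Spec_maximizeSum nums k (maximizeSum nums k)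

-- ===== LEMMAS AND PROOFS =====

-- ===== VERDICT (by name: the statement is the Claim_ definition above) =====
lemma foldl_if_eq_foldl_max (nums : List Int) (a : Int) :
    nums.foldl (fun m n => if m < n then n else m) a = nums.foldl max a := by
  induction nums generalizing a with
  | nil => rfl
  | cons x t ih =>
      simp only [List.foldl_cons, ih]
      congr 1
      rcases le_total a x with h | h
      · simp [max_eq_right h]; omega
      · simp [max_eq_left h]; omega

lemma sum_range_closed (m : Int) (n : Nat) :
    (PySem.List.pyRange 0 (n : Int) 1).foldl (fun t i => t + (m + i)) 0
      = n * m + PySem.Int.floordiv ((n : Int) * ((n : Int) - 1)) 2 := by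
  induction n with
  | zero => simp [PySem.List.pyRange_one_eq_nil, PySem.Int.floordiv]
  | succ n ih =>
      have h : PySem.List.pyRange 0 ((n : Int) + 1) 1
          = PySem.List.pyRange 0 (n : Int) 1 ++ [(n : Int)] := by
        exact PySem.List.pyRange_one_succ_right (by exact_mod_cast Nat.zero_le n)
      push_cast
      rw [h, List.foldl_append, ih]
      simp only [List.foldl_cons, List.foldl_nil]
      rw [PySem.Int.floordiv_eq_ediv_of_pos (by norm_num),
          PySem.Int.floordiv_eq_ediv_of_pos (by norm_num)]
      have h1 : ((n : Int) + 1) * m = (n : Int) * m + m := by ring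
      have ht : ((n : Int) + 1) * (((n : Int) + 1) - 1)
          = (n : Int) * ((n : Int) - 1) + 2 * (n : Int) := by ring
      rw [h1, ht]
      generalize (n : Int) * m = a
      generalize (n : Int) * ((n : Int) - 1) = b
      omega


theorem maximizeSum_spec : Claim_equal_maximizeSum := by
  intro nums k _
  unfold Spec_maximizeSum maximizeSum maximizeSum_alt
  simp only [PySem.List.max?_id_cons, Option.getD_some, foldl_if_eq_foldl_max]
  by_cases hk : k ≤ 0
  · simp [hk, PySem.List.pyRange_one_eq_nil hk]
  · simp only [hk, if_false]
    have hk0 : 0 ≤ k := by omega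
    obtain ⟨n, rfl⟩ := Int.eq_ofNat_of_zero_le hk0
    exact sum_range_closed _ n
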